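-- pv_equiv track=rewrite | github.com/OliviaSeidel/SAQ_TestStand | PaperPlotsCodeReveiw/Full pressure sweep/SAQ_analysis_times.py | fix_wrap_around
-- ===== SOURCE A (Python) =====
-- def fix_wrap_around(times):
--     """
--     update timestamp values from the zybo
--     every timestamp that is less than the previous indicates a 'wrap around'
--     """
--
--     wrap_val = 2**32
--     n_wrap = 0
--     inc_times = [times[0]]
--     for i, t in enumerate(times[:-1]):
--
--         if times[i+1] < t:
--             n_wrap += 1
--
--         cur_time = times[i+1] + (n_wrap * wrap_val)
--         inc_times.append(cur_time)
--
--     return inc_times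
-- ===== SOURCE B (Python) =====
-- def fix_wrap_around(times):
--     # wrap flag per adjacent pair: 1 when the later timestamp is smaller
--     flags = [1 if b < a else 0 for a, b in zip(times, times[1:])]
--     # cumulative wrap counts aligned so the first element gets offset 0
--     offsets = [0]
--     for f in flags:
--         offsets.append(offsets[-1] + f)
--     return [t + o * 2 ** 32 for t, o in zip(times, offsets)]
-- ===== Notes on version B (the rewrite author's own statement) =====
-- stated objective: alternative
-- what changed: Replaces A's single fused index-based loop (running wrap counter, repeated times[i+1] lookups, append) with a three-stage pipeline: a pairwise wrap-flag list from zip(times, times[1:]), a prefix-sum offset list, and a final zip comprehension adding offset*2**32.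
import Mathlib
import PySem

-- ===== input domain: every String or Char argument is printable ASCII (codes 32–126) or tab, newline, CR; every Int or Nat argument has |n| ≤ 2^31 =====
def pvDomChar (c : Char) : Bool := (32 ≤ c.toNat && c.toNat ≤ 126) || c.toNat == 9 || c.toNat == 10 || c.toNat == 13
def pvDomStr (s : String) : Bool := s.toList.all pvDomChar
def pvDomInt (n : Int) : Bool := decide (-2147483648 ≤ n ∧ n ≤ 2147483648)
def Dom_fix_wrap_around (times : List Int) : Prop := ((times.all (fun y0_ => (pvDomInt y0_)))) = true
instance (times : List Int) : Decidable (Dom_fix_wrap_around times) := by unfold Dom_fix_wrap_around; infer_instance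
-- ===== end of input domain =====

-- B recomputes the wrap correction as a pipeline (pairwise wrap flags, prefix-sum offsets,
-- final zip comprehension) instead of A's fused index loop; objective: alternative decomposition.


-- ===== PORT A =====
-- literal port of A's fused loop: enumerate(times[:-1]), running n_wrap, append to inc_times.
-- (PySem.List.pyGet? times 0).getD 0: times[0]; the 'none' case (IndexError on []) is excluded by Pre_.
def fix_wrap_around (times : List Int) : List Int :=
  let wrap_val : Int := 2 ^ 32
  let inc_times : List Int := [(PySem.List.pyGet? times 0).getD 0]
  let res := (PySem.List.enumerate (PySem.List.slice times none (some (-1)))).foldl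
    (fun (st : Int × List Int) it =>
      let n_wrap := if PySem.List.pyGetD times (it.1 + 1) 0 < it.2 then st.1 + 1 else st.1
      (n_wrap, st.2 ++ [PySem.List.pyGetD times (it.1 + 1) 0 + n_wrap * wrap_val]))
    (0, inc_times)
  res.2

-- ===== PORT B =====
-- literal port of Source B: flags from zip(times, times[1:]), offsets by appending offsets[-1]+f, final zip map.
def fix_wrap_around_alt (times : List Int) : List Int :=
  let flags := (times.zip (PySem.List.slice times (some 1) none)).map
    (fun p => if p.2 < p.1 then (1 : Int) else 0)
  let offsets := flags.foldl (fun acc f => acc ++ [PySem.List.pyGetD acc (-1) 0 + f]) [0]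
  (times.zip offsets).map (fun p => p.1 + p.2 * 2 ^ 32)

-- ===== PRECONDITION & SPEC =====
-- Pre_ excludes only the empty list, on which A raises IndexError (times[0]).
def Pre_fix_wrap_around (times : List Int) : Prop := times ≠ []
instance (times : List Int) : Decidable (Pre_fix_wrap_around times) := by
  unfold Pre_fix_wrap_around; infer_instance

def pvWitness_fix_wrap_around : List Int := [3, 1, 2]

def Spec_fix_wrap_around (times : List Int) (out : List Int) : Prop := out = fix_wrap_around_alt times
instance (times : List Int) (out : List Int) : Decidable (Spec_fix_wrap_around times out) := by unfold Spec_fix_wrap_around; infer_instance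

-- ===== CLAIM (what is proved, stated in full; the proofs are below) =====
def Claim_equal_fix_wrap_around : Prop := ∀ (times : List Int), Dom_fix_wrap_around times → Pre_fix_wrap_around times → Spec_fix_wrap_around times (fix_wrap_around times)

-- ===== LEMMAS AND PROOFS =====

-- the common intermediate: corrected tail given previous raw timestamp and wrap count so far
def wrapGo (prev n : Int) : List Int → List Int
  | [] => []
  | x :: xs =>
    let n' := if x < prev then n + 1 else n
    (x + n' * 2 ^ 32) :: wrapGo x n' xs

-- cumulative sums as B's offsets loop produces them
def cums (n : Int) : List Int → List Int
  | [] => [n]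
  | f :: fs => n :: cums (n + f) fs

lemma offsets_foldl (fs : List Int) : ∀ (acc : List Int) (m : Int),
    fs.foldl (fun acc f => acc ++ [PySem.List.pyGetD acc (-1) 0 + f]) (acc ++ [m])
      = acc ++ cums m fs := by
  induction fs with
  | nil => intro acc m; simp [cums]
  | cons f fs ih =>
    intro acc m
    simp only [List.foldl_cons, PySem.List.pyGetD_neg_one_append_singleton, cums]
    have := ih (acc ++ [m]) (m + f)
    simpa using this

-- A's fold over the consecutive pairs equals wrapGo
lemma A_fold_pairs (rest : List Int) : ∀ (prev n : Int) (acc : List Int),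
    (((prev :: rest).zip rest).foldl
      (fun (st : Int × List Int) (p : Int × Int) =>
        let n_wrap := if p.2 < p.1 then st.1 + 1 else st.1
        (n_wrap, st.2 ++ [p.2 + n_wrap * 2 ^ 32])) (n, acc)).2
      = acc ++ wrapGo prev n rest := by
  induction rest with
  | nil => intro prev n acc; simp [wrapGo]
  | cons x xs ih =>
    intro prev n acc
    simp only [List.zip_cons_cons, List.foldl_cons, wrapGo]
    by_cases h : x < prev <;> simp only [h, if_true, if_false, ih] <;> simp

-- B's final zip-map over cums of the flags equals wrapGo
lemma B_zip_cums (rest : List Int) : ∀ (prev n : Int),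
    ((prev :: rest).zip
        (cums n (((prev :: rest).zip rest).map (fun p => if p.2 < p.1 then (1 : Int) else 0)))).map
      (fun p => p.1 + p.2 * 2 ^ 32)
      = (prev + n * 2 ^ 32) :: wrapGo prev n rest := by
  induction rest with
  | nil => intro prev n; simp [cums, wrapGo]
  | cons x xs ih =>
    intro prev n
    simp only [List.zip_cons_cons, List.map_cons, cums, wrapGo]
    by_cases h : x < prev
    · simp only [h, if_true, ih]
    · simp only [h, if_false, ih]
      norm_num

-- the enumerate-and-index view of A's loop data is exactly the consecutive-pair zip
lemma enumerate_pairs (times : List Int) :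
    (PySem.List.enumerate (PySem.List.slice times none (some (-1)))).map
      (fun it => (it.2, PySem.List.pyGetD times (it.1 + 1) 0))
      = times.zip times.tail := by
  rw [PySem.List.slice_to_neg_one]
  apply List.ext_getElem
  · simp [PySem.List.length_enumerate, List.length_zip, List.length_dropLast,
      List.length_tail]
  · intro k h1 h2
    have hk : k < times.length - 1 := by
      simpa [PySem.List.length_enumerate] using h1
    simp only [List.getElem_map, PySem.List.getElem_enumerate, List.getElem_zip,
      Prod.mk.injEq]
    constructor
    · rw [List.getElem_dropLast]
    · have hlt : ((0 : Int) + k) + 1 < (times.length : Int) := by omega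
      rw [PySem.List.pyGetD_eq_getElem _ _ (by omega) hlt]
      rw [List.getElem_tail]
      congr 1
      omega

lemma main_eq (times : List Int) (h : times ≠ []) :
    fix_wrap_around times = fix_wrap_around_alt times := by
  obtain ⟨t0, rest, rfl⟩ : ∃ a l, times = a :: l := by
    cases times with
    | nil => exact absurd rfl h
    | cons a l => exact ⟨a, l, rfl⟩
  unfold fix_wrap_around fix_wrap_around_alt
  simp only []
  -- A side: rewrite the enumerate fold as a fold over the pair zip via enumerate_pairs
  have hA := enumerate_pairs (t0 :: rest)
  have hfold := congrArg (fun l => (l.foldl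
      (fun (st : Int × List Int) (p : Int × Int) =>
        let n_wrap := if p.2 < p.1 then st.1 + 1 else st.1
        (n_wrap, st.2 ++ [p.2 + n_wrap * 2 ^ 32])) ((0 : Int), [t0])).2) hA
  simp only [List.foldl_map, List.tail_cons] at hfold
  have h0 : (PySem.List.pyGet? (t0 :: rest) (0 : Int)).getD 0 = t0 := by
    simp [PySem.List.pyGet?, PySem.List.pyIdx?]
  rw [h0, hfold, A_fold_pairs rest t0 0 [t0]]
  -- B side
  rw [PySem.List.slice_from_one]
  have hoffs := offsets_foldl
    (((t0 :: rest).zip rest).map (fun p => if p.2 < p.1 then (1 : Int) else 0)) [] 0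
  simp only [List.nil_append] at hoffs
  simp only [List.tail_cons, hoffs]
  have := B_zip_cums rest t0 0
  rw [this]
  simp

-- ===== VERDICT (by name: the statement is the Claim_ definition above) =====
theorem fix_wrap_around_spec : Claim_equal_fix_wrap_around := by
  intro times _ hpre
  unfold Spec_fix_wrap_around
  exact main_eq times hpre
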